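-- pv_equiv track=rewrite | github.com/ramonfullstack/python_taz | taz/pollers/product/converter.py | _create_selections
-- ===== SOURCE A (Python) =====
-- def _create_selections(raw):
--     selections = (
--         raw['selections'].split('|')
--         if raw.get('selections') else []
--     )
--
--     result = {}
--     for selection in selections:
--         partner_id, selection_id = selection.split(';')
--         if partner_id not in result:
--             result[partner_id] = []
--         result[partner_id].append(selection_id)
--
--     return result
-- ===== SOURCE B (Python) =====
-- def _create_selections(raw):
--     sel = raw.get('selections')
--     pairs = []
--     for item in (sel.split('|') if sel else []):
--         partner_id, selection_id = item.split(';')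
--         pairs.append((partner_id, selection_id))
--     seen = []
--     for pid, _ in pairs:
--         if pid not in seen:
--             seen.append(pid)
--     return {pid: [s for p, s in pairs if p == pid] for pid in seen}
-- ===== Notes on version B (the rewrite author's own statement) =====
-- stated objective: alternative
-- what changed: Replaced A's single-pass incremental dict-bucketing (create-empty-then-append per element) with a three-stage pipeline: build the (partner_id, selection_id) pair list, ordered-dedup the partner ids, then produce each group by a per-partner filter pass over the pair list.
import Mathlib
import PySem

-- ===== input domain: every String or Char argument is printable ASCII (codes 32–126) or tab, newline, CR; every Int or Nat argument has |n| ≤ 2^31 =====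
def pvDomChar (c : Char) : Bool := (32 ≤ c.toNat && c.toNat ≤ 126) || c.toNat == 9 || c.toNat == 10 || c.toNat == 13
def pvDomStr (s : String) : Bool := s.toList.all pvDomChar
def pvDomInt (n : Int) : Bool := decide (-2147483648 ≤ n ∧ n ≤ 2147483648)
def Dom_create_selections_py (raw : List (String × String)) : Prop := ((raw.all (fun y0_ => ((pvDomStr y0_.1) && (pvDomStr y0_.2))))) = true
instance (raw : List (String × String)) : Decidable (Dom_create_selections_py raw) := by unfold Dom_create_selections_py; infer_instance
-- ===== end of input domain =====

-- B replaces A's incremental dict-bucketing with pair list → ordered dedup of partner ids → per-partner filter; alternative decomposition, same cost class.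

-- ===== PORT A =====
-- shared by both ports and Pre_: both Pythons compute the selections list identically
-- (raw.get('selections') truthiness guard, then split on '|')
def pvSelections (raw : List (String × String)) : List String :=
  match (PySem.Dict.mk raw).get? "selections" with
  | some s => if s ≠ "" then (PySem.Str.split? s "|").getD [] else []  -- split? is some (sep "|" ≠ "")
  | none => []

-- loop body of A: partner_id, selection_id = selection.split(';'); create-empty-then-append.
-- A malformed selection raises ValueError in Python (excluded by Pre_); the port leaves result unchanged there.
def pvStepA (result : PySem.Dict String (List String)) (selection : String) :
    PySem.Dict String (List String) :=
  match PySem.Str.split? selection ";" with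
  | some [partner_id, selection_id] =>
      let result := if result.contains partner_id then result else result.insert partner_id []
      result.modify partner_id [] (fun l => l ++ [selection_id])
  | _ => result

def create_selections_py (raw : List (String × String)) : List (String × List String) :=
  ((pvSelections raw).foldl pvStepA PySem.Dict.empty).items

-- ===== PORT B =====
def pvPairStep (ps : List (String × String)) (item : String) : List (String × String) :=
  match PySem.Str.split? item ";" with
  | some [partner_id, selection_id] => ps ++ [(partner_id, selection_id)]
  | _ => ps

def create_selections_py_alt (raw : List (String × String)) : List (String × List String) :=
  let pairs := (pvSelections raw).foldl pvPairStep []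
  let seen := pairs.foldl (fun seen p => if p.1 ∈ seen then seen else seen ++ [p.1]) []
  seen.map (fun pid => (pid, (pairs.filter (fun p => p.1 == pid)).map (·.2)))

-- ===== PRECONDITION & SPEC =====
-- Pre_ excludes exactly the inputs where Python A raises ValueError: some '|'-piece of the
-- selections string does not split on ';' into exactly two parts.
def Pre_create_selections_py (raw : List (String × String)) : Prop :=
  ∀ item ∈ pvSelections raw, ((PySem.Str.split? item ";").getD []).length = 2
instance (raw : List (String × String)) : Decidable (Pre_create_selections_py raw) := by
  unfold Pre_create_selections_py; infer_instance
def pvWitness_create_selections_py : (List (String × String)) :=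
  [("selections", "a;1|b;2|a;3")]
def Spec_create_selections_py (raw : List (String × String)) (out : List (String × List String)) : Prop := out = create_selections_py_alt raw
instance (raw : List (String × String)) (out : List (String × List String)) : Decidable (Spec_create_selections_py raw out) := by unfold Spec_create_selections_py; infer_instance

-- ===== CLAIM (what is proved, stated in full; the proofs are below) =====
def Claim_equal_create_selections_py : Prop := ∀ (raw : List (String × String)), Dom_create_selections_py raw → Pre_create_selections_py raw → Spec_create_selections_py raw (create_selections_py raw)

-- ===== LEMMAS AND PROOFS =====

-- A's create-empty-then-append step is a single modify with default []
theorem pvStepA_eq_modify (d : PySem.Dict String (List String)) (sel : String) :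
    pvStepA d sel =
      match PySem.Str.split? sel ";" with
      | some [p, s] => d.modify p [] (fun l => l ++ [s])
      | _ => d := by
  unfold pvStepA
  cases h : PySem.Str.split? sel ";" with
  | none => rfl
  | some l =>
    match l with
    | [] => rfl
    | [a] => rfl
    | a :: b :: c :: t3 => rfl
    | [a, b] =>
      simp only []
      cases hc : d.contains a <;>
        simp [PySem.Dict.modify, PySem.Dict.getD_insert_self, hc,
          PySem.Dict.getD_of_not_contains, PySem.Dict.insert_insert_self]

def pvPairsOf : List String → List (String × String)
  | [] => []
  | it :: rest =>
      (match PySem.Str.split? it ";" with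
       | some [a, b] => [(a, b)]
       | _ => []) ++ pvPairsOf rest

theorem pv_pairStep_foldl (sels : List String) (ps : List (String × String)) :
    sels.foldl pvPairStep ps = ps ++ pvPairsOf sels := by
  induction sels generalizing ps with
  | nil => simp [pvPairsOf]
  | cons it rest ih =>
    simp only [List.foldl_cons, pvPairsOf, ih]
    cases h : PySem.Str.split? it ";" with
    | none => simp [pvPairStep, h]
    | some l =>
      match l with
      | [] => simp [pvPairStep, h]
      | [a] => simp [pvPairStep, h]
      | [a, b] => simp [pvPairStep, h]
      | a :: b :: c :: t => simp [pvPairStep, h]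

theorem pv_stepA_foldl (sels : List String) (d : PySem.Dict String (List String)) :
    sels.foldl pvStepA d =
      (pvPairsOf sels).foldl (fun d q => d.modify q.1 [] (fun l => l ++ [q.2])) d := by
  induction sels generalizing d with
  | nil => rfl
  | cons it rest ih =>
    simp only [List.foldl_cons, pvPairsOf, List.foldl_append]
    rw [pvStepA_eq_modify, ih]
    cases h : PySem.Str.split? it ";" with
    | none => rfl
    | some l =>
      match l with
      | [] => rfl
      | [a] => rfl
      | [a, b] => rfl
      | a :: b :: c :: t => rfl

-- ===== VERDICT (by name: the statement is the Claim_ definition above) =====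
theorem create_selections_py_spec : Claim_equal_create_selections_py := by
  intro raw _ _
  unfold Spec_create_selections_py create_selections_py create_selections_py_alt
  rw [pv_stepA_foldl, pv_pairStep_foldl]
  dsimp only
  simp only [List.nil_append]
  set pairs := pvPairsOf (pvSelections raw) with hp
  set D := pairs.foldl (fun d q => d.modify q.1 [] (fun l => l ++ [q.2])) PySem.Dict.empty with hD
  have hkeys : D.keys = PySem.Set.ofList (pairs.map (·.1)) := by
    rw [hD, PySem.Dict.keys_foldl_modify_key]
    simp [PySem.Set.ofList_eq_foldl, PySem.Set.update, PySem.Dict.keys_empty]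
  have hnd : D.keys.Nodup := by rw [hkeys]; exact PySem.Set.nodup_ofList _
  have hseen : pairs.foldl (fun seen p => if p.1 ∈ seen then seen else seen ++ [p.1]) []
      = PySem.Set.ofList (pairs.map (·.1)) := by
    rw [PySem.Set.ofList_eq_foldl, List.foldl_map]
    apply PySem.List.foldl_congr_mem
    intro acc x _
    simp [PySem.Set.add, List.contains_eq_mem]
  rw [hseen, PySem.Dict.items_eq_map_keys D hnd [], hkeys]
  apply List.map_congr_left
  intro k _
  rw [hD, PySem.Dict.getD_foldl_modify_append]
  simp
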